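-- pv_equiv track=rewrite | github.com/hibana2077/PKB | vis.py | collect_indices_by_class
-- ===== SOURCE A (Python) =====
-- from typing import List, Tuple, Optional, Dict
--
-- def collect_indices_by_class(labels: List[int], k: int) -> List[int]:
--     if k <= 0:
--         return list(range(len(labels)))
--     selected = []
--     per_class_counter: Dict[int, int] = {}
--     for idx, y in enumerate(labels):
--         c = int(y)
--         per_class_counter.setdefault(c, 0)
--         if per_class_counter[c] < k:
--             selected.append(idx)
--             per_class_counter[c] += 1
--     return selected
-- ===== SOURCE B (Python) =====
-- def collect_indices_by_class(labels, k):
--     if k <= 0: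
--         return list(range(len(labels)))
--     groups = {}
--     for i, y in enumerate(labels):
--         groups.setdefault(int(y), []).append(i)
--     picked = []
--     for idxs in groups.values():
--         picked.extend(idxs[:k])
--     return sorted(picked)
-- ===== Notes on version B (the rewrite author's own statement) =====
-- stated objective: alternative
-- what changed: Replaces A's single pass with a per-class running counter by a group-then-select decomposition: one pass builds a dict from class to its ordered index list, then the first k indices of each group are collected and sorted back into ascending order.
import Mathlib
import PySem

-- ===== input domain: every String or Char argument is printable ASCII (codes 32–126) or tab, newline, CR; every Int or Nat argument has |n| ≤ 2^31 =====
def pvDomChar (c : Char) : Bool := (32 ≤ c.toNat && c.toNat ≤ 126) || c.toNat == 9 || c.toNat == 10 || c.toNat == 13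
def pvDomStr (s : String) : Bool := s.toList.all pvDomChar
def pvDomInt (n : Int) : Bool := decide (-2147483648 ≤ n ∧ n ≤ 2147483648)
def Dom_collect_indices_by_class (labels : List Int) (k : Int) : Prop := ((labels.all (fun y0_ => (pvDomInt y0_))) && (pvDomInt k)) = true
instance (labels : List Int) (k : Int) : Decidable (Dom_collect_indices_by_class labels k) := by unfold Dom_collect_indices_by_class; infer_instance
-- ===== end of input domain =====

-- B replaces A's single pass with a per-class running counter by a group-then-select decomposition:
-- group indices by class, take the first k of each group, sort the union back into ascending order.

-- ===== PORT A =====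
-- loop body of A's for-loop: state = (selected, per_class_counter)
def pvStepA (k : Int) (st : List Int × PySem.Dict Int Int) (p : Int × Int) :
    List Int × PySem.Dict Int Int :=
  let c := p.2
  let d := st.2.setdefault c 0            -- per_class_counter.setdefault(c, 0)
  if d.getD c 0 < k then (st.1 ++ [p.1], d.insert c (d.getD c 0 + 1))
  else (st.1, d)

def collect_indices_by_class (labels : List Int) (k : Int) : List Int :=
  if k ≤ 0 then PySem.List.pyRange 0 (labels.length : Int) 1
  else ((PySem.List.enumerate labels 0).foldl (pvStepA k) ([], PySem.Dict.empty)).1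

-- ===== PORT B =====
def collect_indices_by_class_alt (labels : List Int) (k : Int) : List Int :=
  if k ≤ 0 then PySem.List.pyRange 0 (labels.length : Int) 1
  else
    -- groups.setdefault(int(y), []).append(i)  ==  groups[int(y)] = groups.get(int(y), []) + [i]
    let groups := (PySem.List.enumerate labels 0).foldl
      (fun (d : PySem.Dict Int (List Int)) p => d.modify p.2 [] (· ++ [p.1]))
      PySem.Dict.empty
    -- picked.extend(idxs[:k]) over groups.values()
    let picked := groups.values.foldl
      (fun acc idxs => acc ++ PySem.List.slice idxs none (some k)) []
    PySem.List.sorted picked (fun x => x) false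

-- ===== PRECONDITION & SPEC =====
def Spec_collect_indices_by_class (labels : List Int) (k : Int) (out : List Int) : Prop := out = collect_indices_by_class_alt labels k
instance (labels : List Int) (k : Int) (out : List Int) : Decidable (Spec_collect_indices_by_class labels k out) := by unfold Spec_collect_indices_by_class; infer_instance

-- ===== CLAIM (what is proved, stated in full; the proofs are below) =====
def Claim_equal_collect_indices_by_class : Prop := ∀ (labels : List Int) (k : Int), Dom_collect_indices_by_class labels k → Spec_collect_indices_by_class labels k (collect_indices_by_class labels k)

-- ===== LEMMAS AND PROOFS =====

-- A's output, in closed form: the indices whose label occurs fewer than k times before them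
def pvF (labels : List Int) (k : Int) : List Int :=
  (PySem.List.enumerate labels 0).filterMap
    (fun p => if ((PySem.List.count (PySem.List.slice labels none (some p.1)) p.2 : Int)) < k
              then some p.1 else none)

-- the ordered list of indices carrying class c (what B's groups dict stores at key c)
def pvPos (labels : List Int) (c : Int) : List Int :=
  ((PySem.List.enumerate labels 0).filter (fun p => p.2 == c)).map (·.1)

-- invariant-carrying loop lemma: A's fold equals the closed form pvF,
-- given the counter records min(count in processed prefix, k) for every class
lemma pvFoldA_eq (k : Int) (labels : List Int) :
    ∀ (rest : List Int) (s : Nat) (acc : List Int) (d : PySem.Dict Int Int),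
      labels.drop s = rest →
      (∀ c : Int, d.getD c 0 = min (((labels.take s).count c : Int)) k) →
      ((PySem.List.enumerate rest (s : Int)).foldl (pvStepA k) (acc, d)).1
        = acc ++ (PySem.List.enumerate rest (s : Int)).filterMap
            (fun p => if ((PySem.List.count (PySem.List.slice labels none (some p.1)) p.2 : Int)) < k
                      then some p.1 else none) := by
  intro rest
  induction rest with
  | nil => intro s acc d _ _; simp [PySem.List.enumerate_nil]
  | cons x rest' ih =>
    intro s acc d hdrop hinv
    have hxs : labels[s]? = some x := by
      rw [← List.head?_drop, hdrop]; rfl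
    have htake : labels.take (s + 1) = labels.take s ++ [x] := by
      rw [List.take_add_one, hxs]; rfl
    have hdrop' : labels.drop (s + 1) = rest' := by
      rw [← List.drop_drop, hdrop]; rfl
    have hslice : PySem.List.slice labels none (some (s : Int)) = labels.take s :=
      PySem.List.slice_to_natCast labels s
    rw [PySem.List.enumerate_cons]
    have hcast : (s : Int) + 1 = ((s + 1 : Nat) : Int) := by push_cast; ring
    have hsd : ((d.setdefault x 0).getD x 0) = d.getD x 0 :=
      PySem.Dict.getD_setdefault_self d x 0 0
    have hx := hinv x
    by_cases hlt : ((labels.take s).count x : Int) < k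
    · -- selected
      have hcond : (d.setdefault x 0).getD x 0 < k := by rw [hsd, hx]; omega
      have hstep : pvStepA k (acc, d) ((s : Int), x)
          = (acc ++ [(s : Int)],
             (d.setdefault x 0).insert x ((d.setdefault x 0).getD x 0 + 1)) := by
        simp only [pvStepA, hcond, if_pos]
      rw [List.foldl_cons, hstep, hcast, ih (s + 1) _ _ hdrop' ?_, List.filterMap_cons]
      · simp only [PySem.List.count_eq, hslice, hlt, if_pos, ← hcast]
        simp
      · intro c
        rw [PySem.Dict.getD_insert, htake, List.count_append]
        by_cases hc : c = x
        · subst hc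
          simp only [hsd, hx, List.count_singleton]
          simp only [BEq.rfl, if_pos]
          push_cast; omega
        · have : ((d.setdefault x 0).getD c 0) = d.getD c 0 := by
            rw [PySem.Dict.getD_eq_get?_getD, PySem.Dict.get?_setdefault_of_ne d 0 hc,
              ← PySem.Dict.getD_eq_get?_getD]
          simp only [if_neg hc, this, hinv c, List.count_singleton]
          have hne : (x == c) = false := beq_eq_false_iff_ne.mpr (fun h => hc h.symm)
          simp [hne]
    · -- not selected
      have hcond : ¬ (d.setdefault x 0).getD x 0 < k := by rw [hsd, hx]; omega
      have hstep : pvStepA k (acc, d) ((s : Int), x) = (acc, d.setdefault x 0) := by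
        simp only [pvStepA, hcond, if_false]
      rw [List.foldl_cons, hstep, hcast, ih (s + 1) _ _ hdrop' ?_, List.filterMap_cons]
      · simp only [PySem.List.count_eq, hslice, hlt, if_false]
      · intro c
        rw [htake, List.count_append]
        by_cases hc : c = x
        · subst hc
          rw [hsd, hx, List.count_singleton]
          simp only [BEq.rfl, if_pos]
          push_cast; omega
        · have : ((d.setdefault x 0).getD c 0) = d.getD c 0 := by
            rw [PySem.Dict.getD_eq_get?_getD, PySem.Dict.get?_setdefault_of_ne d 0 hc,
              ← PySem.Dict.getD_eq_get?_getD]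
          rw [this, hinv c, List.count_singleton]
          have hne : (x == c) = false := beq_eq_false_iff_ne.mpr (fun h => hc h.symm)
          simp [hne]

-- a filterMap through an if is a filter then a map
lemma pvFilterMap_if {α β : Type} (l : List α) (p : α → Prop) [DecidablePred p] (f : α → β) :
    l.filterMap (fun x => if p x then some (f x) else none)
      = (l.filter (fun x => decide (p x))).map f := by
  induction l with
  | nil => rfl
  | cons a t ih => by_cases h : p a <;> simp [h, ih]

lemma pvF_eq_map_filter (labels : List Int) (k : Int) :
    pvF labels k = ((PySem.List.enumerate labels 0).filter
      (fun p => decide (((PySem.List.count (PySem.List.slice labels none (some p.1)) p.2 : Int)) < k))).map (·.1) :=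
  pvFilterMap_if _ _ _

lemma pvF_pairwise (labels : List Int) (k : Int) : (pvF labels k).Pairwise (· < ·) := by
  rw [pvF_eq_map_filter]
  exact List.Pairwise.map _ (fun _ _ hab => hab)
    ((PySem.List.pairwise_lt_enumerate labels 0).sublist List.filter_sublist)

lemma pvPos_pairwise (labels : List Int) (c : Int) : (pvPos labels c).Pairwise (· < ·) :=
  List.Pairwise.map _ (fun _ _ hab => hab)
    ((PySem.List.pairwise_lt_enumerate labels 0).sublist List.filter_sublist)

lemma pvMem_pos {labels : List Int} {c i : Int} :
    i ∈ pvPos labels c ↔ ∃ (s : Nat) (_ : s < labels.length), i = (s : Int) ∧ labels[s] = c := by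
  simp only [pvPos, List.mem_map, List.mem_filter, PySem.List.mem_enumerate_iff]
  constructor
  · rintro ⟨p, ⟨⟨s, hs, rfl⟩, hc⟩, rfl⟩
    exact ⟨s, hs, by simp, by simpa using hc⟩
  · rintro ⟨s, hs, rfl, hc⟩
    exact ⟨((s : Int), labels[s]), ⟨⟨s, hs, by simp⟩, by simpa using hc⟩, rfl⟩

-- how many indices of class c precede position s
lemma pvCountP_pos (labels : List Int) (c : Int) (s : Nat) (hs : s ≤ labels.length) :
    (pvPos labels c).countP (fun y => decide (y < (s : Int))) = (labels.take s).count c := by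
  rw [pvPos, List.countP_map, List.countP_filter]
  simp only [Function.comp_apply]
  have hsplit : labels = labels.take s ++ labels.drop s := (List.take_append_drop s labels).symm
  conv_lhs => rw [hsplit]
  rw [PySem.List.enumerate_append, List.countP_append]
  have hlen : (labels.take s).length = s := by simp [hs]
  have h1 : (PySem.List.enumerate (labels.take s) 0).countP
      (fun x => decide (x.1 < (s : Int)) && (x.2 == c))
      = (PySem.List.enumerate (labels.take s) 0).countP (fun p => p.2 == c) := by
    apply List.countP_congr
    intro p hp
    rw [PySem.List.mem_enumerate_iff] at hp
    rcases hp with ⟨j, hj, rfl⟩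
    have : (0 + (j : Int)) < (s : Int) := by
      rw [hlen] at hj; omega
    rw [decide_eq_true this, Bool.true_and]
  have h2 : (PySem.List.enumerate (labels.take s) 0).countP (fun p => p.2 == c)
      = (labels.take s).count c := by
    conv_rhs => rw [← PySem.List.map_snd_enumerate (labels.take s) 0]
    rw [List.count_eq_countP, List.countP_map]; rfl
  have h3 : (PySem.List.enumerate (labels.drop s) (0 + (labels.take s).length)).countP
      (fun x => decide (x.1 < (s : Int)) && (x.2 == c)) = 0 := by
    apply List.countP_eq_zero.mpr
    intro p hp
    rw [PySem.List.mem_enumerate_iff] at hp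
    rcases hp with ⟨j, hj, rfl⟩
    have : ¬ (0 + ((labels.take s).length : Int) + (j : Int) < (s : Int)) := by
      rw [hlen]; omega
    rw [decide_eq_false this, Bool.false_and]
    simp
  rw [h1, h2, h3]
  exact Nat.add_zero _

-- in a strictly increasing list, membership in the first m elements counts the smaller elements
lemma pvMem_take_iff {l : List Int} (hp : l.Pairwise (· < ·)) {x : Int} (hx : x ∈ l) (m : Nat) :
    x ∈ l.take m ↔ l.countP (fun y => decide (y < x)) < m := by
  induction l generalizing m with
  | nil => cases hx
  | cons a t ih =>
    rcases List.mem_cons.mp hx with rfl | hxt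
    · have hz : t.countP (fun y => decide (y < x)) = 0 := by
        apply List.countP_eq_zero.mpr
        intro y hy
        have := (List.pairwise_cons.mp hp).1 y hy
        simp; omega
      cases m with
      | zero => simp
      | succ m' => simp [List.take_succ_cons, hz]
    · have hax : a < x := (List.pairwise_cons.mp hp).1 x hxt
      have hxa : ¬ x = a := by omega
      cases m with
      | zero => simp [hax]
      | succ m' =>
        rw [List.take_succ_cons, List.mem_cons, List.countP_cons]
        simp only [hxa, false_or]
        rw [ih (List.pairwise_cons.mp hp).2 hxt m']
        simp only [hax, decide_true, if_true]
        omega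

-- B's picked list, in closed form: for each distinct class, the first k of its index list
lemma pvGroups_getD (labels : List Int) (c : Int) :
    ((PySem.List.enumerate labels 0).foldl
        (fun (d : PySem.Dict Int (List Int)) p => d.modify p.2 [] (· ++ [p.1]))
        PySem.Dict.empty).getD c [] = pvPos labels c := by
  have hswap : (PySem.List.enumerate labels 0).foldl
      (fun (d : PySem.Dict Int (List Int)) p => d.modify p.2 [] (· ++ [p.1])) PySem.Dict.empty
      = ((PySem.List.enumerate labels 0).map Prod.swap).foldl
        (fun (d : PySem.Dict Int (List Int)) q => d.modify q.1 [] (· ++ [q.2])) PySem.Dict.empty := by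
    rw [List.foldl_map]; rfl
  rw [hswap, PySem.Dict.getD_foldl_modify_append, PySem.Dict.getD_empty, List.filter_map]
  rw [List.nil_append, List.map_map, pvPos]
  rfl

lemma pvGroups_keys (labels : List Int) :
    ((PySem.List.enumerate labels 0).foldl
        (fun (d : PySem.Dict Int (List Int)) p => d.modify p.2 [] (· ++ [p.1]))
        PySem.Dict.empty).keys = PySem.Set.ofList labels := by
  rw [PySem.Dict.keys_foldl_modify_key]
  rw [PySem.Dict.keys_empty, PySem.List.map_snd_enumerate]
  rw [PySem.Set.ofList_eq_foldl]; rfl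

-- B's picked list, in closed form: for each distinct class, the first k of its index list
lemma pvPicked_eq (labels : List Int) (k : Int) (hk : 0 < k) :
    (((PySem.List.enumerate labels 0).foldl
        (fun (d : PySem.Dict Int (List Int)) p => d.modify p.2 [] (· ++ [p.1]))
        PySem.Dict.empty).values).foldl
      (fun acc idxs => acc ++ PySem.List.slice idxs none (some k)) []
    = (PySem.Set.ofList labels).flatMap (fun c => (pvPos labels c).take k.toNat) := by
  have hnodup : ((PySem.List.enumerate labels 0).foldl
      (fun (d : PySem.Dict Int (List Int)) p => d.modify p.2 [] (· ++ [p.1]))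
      PySem.Dict.empty).keys.Nodup := by
    rw [pvGroups_keys]; exact PySem.Set.nodup_ofList labels
  have hvals : ((PySem.List.enumerate labels 0).foldl
      (fun (d : PySem.Dict Int (List Int)) p => d.modify p.2 [] (· ++ [p.1]))
      PySem.Dict.empty).values = (PySem.Set.ofList labels).map (fun c => pvPos labels c) := by
    rw [PySem.Dict.values_eq_map_keys _ hnodup []]
    rw [pvGroups_keys]
    exact List.map_congr_left (fun c _ => pvGroups_getD labels c)
  have htk : ∀ idxs : List Int, PySem.List.slice idxs none (some k) = idxs.take k.toNat := by
    intro idxs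
    have hc : ((k.toNat : Nat) : Int) = k := Int.toNat_of_nonneg (by omega)
    have h := PySem.List.slice_to_natCast idxs k.toNat
    rw [hc] at h
    exact h
  rw [hvals, PySem.List.foldl_append_eq_flatMap, List.nil_append, List.flatMap_map]
  simp only [htk]

-- membership in pvF
lemma pvMem_F {labels : List Int} {k i : Int} :
    i ∈ pvF labels k ↔ ∃ (s : Nat) (_ : s < labels.length),
      i = (s : Int) ∧ (((labels.take s).count labels[s] : Int) < k) := by
  rw [pvF_eq_map_filter]
  simp only [List.mem_map, List.mem_filter, PySem.List.mem_enumerate_iff]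
  constructor
  · rintro ⟨p, ⟨⟨s, hs, rfl⟩, hc⟩, rfl⟩
    refine ⟨s, hs, by simp, ?_⟩
    have hslice : PySem.List.slice labels none (some ((0 : Int) + (s : Int))) = labels.take s := by
      rw [zero_add]; exact PySem.List.slice_to_natCast labels s
    simpa [PySem.List.count_eq, hslice] using hc
  · rintro ⟨s, hs, rfl, hc⟩
    refine ⟨((s : Int), labels[s]), ⟨⟨s, hs, by simp⟩, ?_⟩, rfl⟩
    have hslice : PySem.List.slice labels none (some ((0 : Int) + (s : Int))) = labels.take s := by
      rw [zero_add]; exact PySem.List.slice_to_natCast labels s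
    simpa [PySem.List.count_eq, hslice] using hc

lemma pvB_eq (labels : List Int) (k : Int) (hk : 0 < k) :
    collect_indices_by_class_alt labels k = pvF labels k := by
  unfold collect_indices_by_class_alt
  rw [if_neg (by omega)]
  show PySem.List.sorted
      ((((PySem.List.enumerate labels 0).foldl
          (fun (d : PySem.Dict Int (List Int)) p => d.modify p.2 [] (· ++ [p.1]))
          PySem.Dict.empty).values).foldl
        (fun acc idxs => acc ++ PySem.List.slice idxs none (some k)) [])
      (fun x => x) false = pvF labels k
  rw [pvPicked_eq labels k hk]
  apply PySem.List.sorted_eq_of_perm_of_pairwise_lt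
  · -- pvF is a permutation of the flattened per-class selections
    have hnodupF : (pvF labels k).Nodup := (pvF_pairwise labels k).imp (fun hab => ne_of_lt hab)
    have hnodupP : ((PySem.Set.ofList labels).flatMap
        (fun c => (pvPos labels c).take k.toNat)).Nodup := by
      rw [List.nodup_flatMap]
      refine ⟨?_, ?_⟩
      · intro c _
        exact ((pvPos_pairwise labels c).sublist (List.take_sublist _ _)).imp
          (fun hab => ne_of_lt hab)
      · apply List.Pairwise.imp ?_ (PySem.Set.nodup_ofList labels)
        intro c c' hne i hi hi'
        rcases pvMem_pos.mp (List.mem_of_mem_take hi) with ⟨s, hs, rfl, hc⟩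
        rcases pvMem_pos.mp (List.mem_of_mem_take hi') with ⟨s', hs', heq, hc'⟩
        have : s = s' := by exact_mod_cast heq
        subst this
        exact hne (hc ▸ hc' ▸ rfl)
    rw [List.perm_ext_iff_of_nodup hnodupF hnodupP]
    intro i
    rw [pvMem_F, List.mem_flatMap]
    constructor
    · rintro ⟨s, hs, rfl, hcnt⟩
      refine ⟨labels[s], ?_, ?_⟩
      · rw [PySem.Set.mem_ofList]; exact List.getElem_mem hs
      · rw [pvMem_take_iff (pvPos_pairwise labels labels[s])
            (pvMem_pos.mpr ⟨s, hs, rfl, rfl⟩) k.toNat,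
          pvCountP_pos labels labels[s] s (le_of_lt hs)]
        omega
    · rintro ⟨c, _, hi⟩
      have hmemPos : i ∈ pvPos labels c := List.mem_of_mem_take hi
      rcases pvMem_pos.mp hmemPos with ⟨s, hs, rfl, hc⟩
      refine ⟨s, hs, rfl, ?_⟩
      rw [pvMem_take_iff (pvPos_pairwise labels c) hmemPos k.toNat,
        pvCountP_pos labels c s (le_of_lt hs)] at hi
      rw [hc]
      omega
  · exact pvF_pairwise labels k

-- ===== VERDICT (by name: the statement is the Claim_ definition above) =====
theorem collect_indices_by_class_spec : Claim_equal_collect_indices_by_class := by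
  intro labels k _
  unfold Spec_collect_indices_by_class
  by_cases hk : k ≤ 0
  · unfold collect_indices_by_class collect_indices_by_class_alt
    simp [hk]
  · have hk' : 0 < k := by omega
    rw [pvB_eq labels k hk']
    unfold collect_indices_by_class
    rw [if_neg hk]
    have := pvFoldA_eq k labels labels 0 [] PySem.Dict.empty (by simp)
      (fun c => by simp [PySem.Dict.getD_empty]; omega)
    simpa [pvF] using this
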